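-- pv_equiv track=rewrite | github.com/iChunyu/LearnPython | misc/clean_bib.py | get_and_index
-- ===== SOURCE A (Python) =====
-- def get_and_index(authors, max_count):
--     cnt = 0
--     idx = -1
--
--     k = authors.find('and')
--     while k >= 0:
--         cnt += 1
--         if cnt == max_count:
--             idx = k
--         k = authors.find('and', k+1)
--
--     return idx
-- ===== SOURCE B (Python) =====
-- def get_and_index(authors, max_count):
--     # Split on 'and' ('and' cannot overlap itself, so the pieces delimit every
--     # occurrence); the max_count-th occurrence starts after the first max_count
--     # pieces plus the 3-char separators between them.
--     parts = authors.split('and')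
--     if 0 < max_count < len(parts):
--         return sum(map(len, parts[:max_count])) + 3 * (max_count - 1)
--     return -1
-- ===== Notes on version B (the rewrite author's own statement) =====
-- stated objective: alternative
-- what changed: A scans with repeated str.find, counting matches and capturing the max_count-th index; B splits the string on 'and' once and computes the index arithmetically as the total length of the first max_count pieces plus the separators between them (valid because 'and' cannot overlap itself).
import Mathlib
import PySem

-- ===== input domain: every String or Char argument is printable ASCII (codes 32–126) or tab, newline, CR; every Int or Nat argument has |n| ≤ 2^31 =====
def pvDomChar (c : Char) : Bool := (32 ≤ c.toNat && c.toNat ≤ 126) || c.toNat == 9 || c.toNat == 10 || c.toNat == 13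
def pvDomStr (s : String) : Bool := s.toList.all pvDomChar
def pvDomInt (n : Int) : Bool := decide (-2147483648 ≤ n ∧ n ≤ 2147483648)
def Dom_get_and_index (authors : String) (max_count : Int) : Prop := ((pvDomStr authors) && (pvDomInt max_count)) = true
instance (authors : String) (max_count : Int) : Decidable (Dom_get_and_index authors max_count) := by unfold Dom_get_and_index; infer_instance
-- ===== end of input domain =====

-- B replaces A's find-driven counting loop by a different algorithm: split the
-- string on 'and' once and compute the answer arithmetically from the piece
-- lengths (objective: alternative; correct because 'and' cannot overlap itself).

-- ===== PORT A =====
-- A's while-loop; fuel (one unit per iteration, length+1 is proved sufficient below)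
-- only makes the same computation total, it never cuts off an iteration the loop runs.
def get_and_index_go (authors : String) (max_count : Int) :
    Nat → Int → Int → Int → Int
  | 0, _, idx, _ => idx
  | fuel + 1, cnt, idx, k =>
    if 0 ≤ k then
      let cnt := cnt + 1
      let idx := if cnt = max_count then k else idx
      get_and_index_go authors max_count fuel cnt idx
        (PySem.Str.findFrom authors "and" (k + 1) none)
    else idx

def get_and_index (authors : String) (max_count : Int) : Int :=
  get_and_index_go authors max_count (authors.toList.length + 1) 0 (-1)
    (PySem.Str.find authors "and")

-- ===== PORT B =====
-- authors.split('and') is PySem.Chars.splitOn (the sep ≠ "" form of str.split);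
-- sum(map(len, parts[:max_count])) + 3*(max_count-1) guarded by 0 < max_count < len(parts).
def get_and_index_alt (authors : String) (max_count : Int) : Int :=
  let parts := PySem.Chars.splitOn authors.toList ['a', 'n', 'd']
  if 0 < max_count ∧ max_count < (parts.length : Int) then
    (((parts.take max_count.toNat).map List.length).sum : Int) + 3 * (max_count - 1)
  else -1

-- ===== PRECONDITION & SPEC =====
def Spec_get_and_index (authors : String) (max_count : Int) (out : Int) : Prop := out = get_and_index_alt authors max_count
instance (authors : String) (max_count : Int) (out : Int) : Decidable (Spec_get_and_index authors max_count out) := by unfold Spec_get_and_index; infer_instance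

-- ===== CLAIM (what is proved, stated in full; the proofs are below) =====
def Claim_equal_get_and_index : Prop := ∀ (authors : String) (max_count : Int), Dom_get_and_index authors max_count → Spec_get_and_index authors max_count (get_and_index authors max_count)

-- ===== LEMMAS AND PROOFS =====

-- positions of 'and' in s that are ≥ k, in increasing order
def pvOccs (s : List Char) (k : Nat) : List Nat :=
  (List.range' k (s.length + 1 - k)).filter
    (fun i => PySem.Chars.startswith (s.drop i) ['a', 'n', 'd'])

lemma pvOccs_step (s : List Char) (k : Nat) (hk : k ≤ s.length) :
    pvOccs s k =
      (if PySem.Chars.startswith (s.drop k) ['a', 'n', 'd'] then [k] else []) ++ pvOccs s (k + 1) := by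
  unfold pvOccs
  have h1 : s.length + 1 - k = (s.length - k) + 1 := by omega
  have h2 : s.length + 1 - (k + 1) = s.length - k := by omega
  rw [h1, h2, List.range'_succ, List.filter_cons]
  split <;> simp

lemma pvOccs_last (s : List Char) : pvOccs s s.length = [] := by
  unfold pvOccs
  have h : s.length + 1 - s.length = 1 := by omega
  rw [h]
  simp [List.range', List.filter, List.drop_length, PySem.Chars.startswith]

-- a prefix of some drop j of (s.drop k) is an infix of s.drop k
lemma pv_infix_of_prefix_drop {s : List Char} {k j : Nat}
    (h : ['a', 'n', 'd'] <+: s.drop (k + j)) : ['a', 'n', 'd'] <:+: s.drop k := by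
  have hd : (s.drop k).drop j = s.drop (k + j) := by rw [List.drop_drop]
  have h' : ['a', 'n', 'd'] <+: (s.drop k).drop j := by rw [hd]; exact h
  exact h'.isInfix.trans (List.drop_suffix j (s.drop k)).isInfix

-- findFrom advances one position at a time
lemma pv_findFrom_step (s : List Char) (k : Nat) (hk : k < s.length) :
    PySem.Chars.findFrom s ['a', 'n', 'd'] (k : Int) none =
      if PySem.Chars.startswith (s.drop k) ['a', 'n', 'd'] then (k : Int)
      else PySem.Chars.findFrom s ['a', 'n', 'd'] (((k + 1 : Nat) : Int)) none := by
  by_cases hP : PySem.Chars.startswith (s.drop k) ['a', 'n', 'd'] = true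
  · rw [if_pos hP]
    have hpre : ['a', 'n', 'd'] <+: s.drop k := (PySem.Chars.startswith_iff _ _).mp hP
    have hne : PySem.Chars.findFrom s ['a', 'n', 'd'] (k : Int) none ≠ -1 := fun h =>
      ((PySem.Chars.findFrom_natCast_eq_neg_one_iff s _ k (by omega)).mp h) hpre.isInfix
    obtain ⟨hge, hpre', hmin⟩ := PySem.Chars.findFrom_natCast_spec s ['a', 'n', 'd'] k (by omega) hne
    set v := PySem.Chars.findFrom s ['a', 'n', 'd'] (k : Int) none with hv
    by_cases hvk : v.toNat = k
    · omega
    · exact absurd hpre (hmin k (le_refl _) (by omega))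
  · rw [if_neg hP]
    have hPk : ¬ (['a', 'n', 'd'] <+: s.drop k) := fun h =>
      hP ((PySem.Chars.startswith_iff _ _).mpr h)
    by_cases h1 : PySem.Chars.findFrom s ['a', 'n', 'd'] (((k + 1 : Nat)) : Int) none = -1
    · rw [h1]
      rw [PySem.Chars.findFrom_natCast_eq_neg_one_iff s _ k (by omega)]
      rw [PySem.Chars.findFrom_natCast_eq_neg_one_iff s _ (k + 1) (by omega)] at h1
      intro hinf
      apply h1
      have hIn : PySem.Chars.isIn ['a', 'n', 'd'] (s.drop k) = true :=
        (PySem.Chars.isIn_iff_infix _ _).mpr hinf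
      obtain ⟨j, hj⟩ := (PySem.Chars.exists_prefix_drop_iff_isIn _ _).mpr hIn
      rw [List.drop_drop] at hj
      rcases Nat.eq_zero_or_pos j with hj0 | hjpos
      · subst hj0
        exact absurd (by simpa using hj) hPk
      · have hj' : ['a', 'n', 'd'] <+: s.drop ((k + 1) + (j - 1)) := by
          have he : (k + 1) + (j - 1) = k + j := by omega
          rw [he]; exact hj
        exact pv_infix_of_prefix_drop hj'
    · obtain ⟨hge1, hpre1, hmin1⟩ :=
        PySem.Chars.findFrom_natCast_spec s ['a', 'n', 'd'] (k + 1) (by omega) h1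
      set v := PySem.Chars.findFrom s ['a', 'n', 'd'] (((k + 1 : Nat)) : Int) none with hv
      have hv0 : (0 : Int) ≤ v := le_trans (by exact_mod_cast Nat.zero_le (k + 1)) hge1
      have hne : PySem.Chars.findFrom s ['a', 'n', 'd'] (k : Int) none ≠ -1 := by
        intro h
        apply (PySem.Chars.findFrom_natCast_eq_neg_one_iff s _ k (by omega)).mp h
        have hvk : k + (v.toNat - k) = v.toNat := by omega
        exact pv_infix_of_prefix_drop (j := v.toNat - k) (by rw [hvk]; exact hpre1)
      obtain ⟨hge0, hpre0, hmin0⟩ :=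
        PySem.Chars.findFrom_natCast_spec s ['a', 'n', 'd'] k (by omega) hne
      set w := PySem.Chars.findFrom s ['a', 'n', 'd'] (k : Int) none with hw
      have hw0 : (0 : Int) ≤ w := le_trans (by exact_mod_cast Nat.zero_le k) hge0
      have hwk : w.toNat ≠ k := fun h => hPk (by rwa [h] at hpre0)
      have hwk1 : k + 1 ≤ w.toNat := by omega
      have h2 : ¬ w.toNat < v.toNat := fun h => (hmin1 w.toNat hwk1 h) hpre0
      have h3 : ¬ v.toNat < w.toNat := fun h =>
        (hmin0 v.toNat (by omega) h) hpre1
      omega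

lemma pv_findFrom_last (s : List Char) :
    PySem.Chars.findFrom s ['a', 'n', 'd'] ((s.length : Nat) : Int) none = -1 := by
  rw [PySem.Chars.findFrom_natCast_eq_neg_one_iff s _ s.length (le_refl _)]
  simp [List.drop_length]

-- findFrom returns the head of pvOccs (or -1), and the loop then continues past it
lemma pv_key (s : List Char) : ∀ n k, k ≤ s.length → s.length - k ≤ n →
    (pvOccs s k = [] ∧ PySem.Chars.findFrom s ['a', 'n', 'd'] (k : Int) none = -1) ∨
    (∃ p, pvOccs s k = p :: pvOccs s (p + 1) ∧
      PySem.Chars.findFrom s ['a', 'n', 'd'] (k : Int) none = (p : Int) ∧ p + 1 ≤ s.length) := by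
  intro n
  induction n with
  | zero =>
    intro k hk hn
    have hk' : k = s.length := by omega
    subst hk'
    exact Or.inl ⟨pvOccs_last s, pv_findFrom_last s⟩
  | succ n ih =>
    intro k hk hn
    rcases Nat.eq_or_lt_of_le hk with hk' | hk'
    · subst hk'
      exact Or.inl ⟨pvOccs_last s, pv_findFrom_last s⟩
    · rw [pvOccs_step s k hk, pv_findFrom_step s k hk']
      by_cases hP : PySem.Chars.startswith (s.drop k) ['a', 'n', 'd'] = true
      · exact Or.inr ⟨k, by rw [if_pos hP]; rfl, by rw [if_pos hP], by omega⟩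
      · simp only [if_neg hP]
        simpa using ih (k + 1) (by omega) (by omega)

lemma pv_occs_len (s : List Char) (k : Nat) : (pvOccs s k).length ≤ s.length + 1 - k := by
  calc (pvOccs s k).length ≤ (List.range' k (s.length + 1 - k)).length :=
        List.length_filter_le _ _
    _ = s.length + 1 - k := List.length_range'

-- loop invariant: the loop selects the (max_count - cnt)-th remaining occurrence
lemma pv_go_spec (authors : String) (mc : Int) :
    ∀ fuel k (cnt idx : Int), k ≤ authors.toList.length →
      (pvOccs authors.toList k).length ≤ fuel →
      get_and_index_go authors mc fuel cnt idx
        (PySem.Chars.findFrom authors.toList ['a', 'n', 'd'] (k : Int) none) =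
      if cnt < mc ∧ mc ≤ cnt + ((pvOccs authors.toList k).length : Int) then
        ((pvOccs authors.toList k).getD (mc - cnt - 1).toNat 0 : Int)
      else idx := by
  intro fuel
  induction fuel with
  | zero =>
    intro k cnt idx hk hlen
    rcases pv_key authors.toList (authors.toList.length - k) k hk (le_refl _) with
      ⟨hocc, hfind⟩ | ⟨p, hocc, _, _⟩
    · rw [hocc]
      simp only [get_and_index_go, List.length_nil]
      rw [if_neg (by omega)]
    · rw [hocc] at hlen; simp at hlen
  | succ fuel ih =>
    intro k cnt idx hk hlen
    rcases pv_key authors.toList (authors.toList.length - k) k hk (le_refl _) with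
      ⟨hocc, hfind⟩ | ⟨p, hocc, hfind, hp1⟩
    · rw [hocc, hfind]
      simp only [get_and_index_go, List.length_nil]
      rw [if_neg (by omega), if_neg (by omega)]
    · rw [hocc, hfind]
      simp only [get_and_index_go]
      rw [if_pos (by exact_mod_cast Nat.zero_le p)]
      have hstr : PySem.Str.findFrom authors "and" ((p : Int) + 1) none =
          PySem.Chars.findFrom authors.toList ['a', 'n', 'd'] (((p + 1 : Nat)) : Int) none := by
        have hc : ((p : Int) + 1) = ((p + 1 : Nat) : Int) := by push_cast; ring
        rw [hc]
        simp [PySem.Str.findFrom_eq]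
      rw [hstr, ih (p + 1) (cnt + 1)
        (if cnt + 1 = mc then (p : Int) else idx) hp1
        (by rw [hocc] at hlen; simpa using hlen)]
      simp only [List.length_cons]
      by_cases h1 : mc = cnt + 1
      · rw [if_neg (by omega), if_pos (by omega), if_pos (by omega)]
        have h0 : (mc - cnt - 1).toNat = 0 := by omega
        rw [h0, List.getD_cons_zero]
      · by_cases h2 : cnt + 1 < mc
        · by_cases h3 : mc ≤ cnt + 1 + ((pvOccs authors.toList (p + 1)).length : Int)
          · rw [if_pos ⟨h2, h3⟩, if_pos (by push_cast at h3 ⊢; omega)]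
            have hidx : (mc - cnt - 1).toNat = (mc - (cnt + 1) - 1).toNat + 1 := by omega
            rw [hidx, List.getD_cons_succ]
          · rw [if_neg (fun h => h3 h.2), if_neg (by omega), if_neg (by omega)]
        · rw [if_neg (by omega), if_neg (by omega), if_neg (by push_cast; omega)]

-- ===== B-side proof machinery: characterise splitOn by a structural greedy split =====

-- structural mirror of splitOn's greedy scan (proof helper only; B's port calls splitOn)
def pvGsplit : List Char → List (List Char)
  | [] => [[]]
  | c :: rest =>
    if ['a', 'n', 'd'].isPrefixOf (c :: rest) then [] :: pvGsplit (rest.drop 2)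
    else (pvGsplit rest).modifyHead (c :: ·)
termination_by l => l.length
decreasing_by all_goals (simp; try omega)

-- occurrence positions, recursively (0 :: shifted tail on a match, using non-overlap)
def pvROccs : List Char → List Nat
  | [] => []
  | c :: rest =>
    if ['a', 'n', 'd'].isPrefixOf (c :: rest) then
      0 :: (pvROccs (rest.drop 2)).map (· + 3)
    else (pvROccs rest).map (· + 1)
termination_by l => l.length
decreasing_by all_goals (simp; try omega)

lemma pv_modifyHead_id (g : List (List Char)) :
    g.modifyHead (fun x : List Char => x) = g := by
  cases g <;> simp

lemma pv_go_eq_gsplit : ∀ n (l : List Char), l.length ≤ n → ∀ fuel, l.length < fuel →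
    ∀ (cur : List Char) (acc : List (List Char)),
    PySem.Chars.splitOn.go ['a', 'n', 'd'] fuel l cur acc =
      acc.reverse ++ (pvGsplit l).modifyHead (cur.reverse ++ ·) := by
  intro n
  induction n with
  | zero =>
    intro l hl fuel hf cur acc
    have : l = [] := by cases l <;> simp_all
    subst this
    cases fuel with
    | zero => omega
    | succ f => simp [PySem.Chars.splitOn.go, pvGsplit]
  | succ n ih =>
    intro l hl fuel hf cur acc
    cases fuel with
    | zero => omega
    | succ f =>
      cases l with
      | nil => simp [PySem.Chars.splitOn.go, pvGsplit]
      | cons c rest =>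
        by_cases hP : ['a', 'n', 'd'].isPrefixOf (c :: rest) = true
        · have hgo : PySem.Chars.splitOn.go ['a', 'n', 'd'] (f + 1) (c :: rest) cur acc =
              PySem.Chars.splitOn.go ['a', 'n', 'd'] f (List.drop 3 (c :: rest)) []
                (cur.reverse :: acc) := by
            simp [PySem.Chars.splitOn.go, hP]
          rw [hgo]
          have hd : List.drop 3 (c :: rest) = rest.drop 2 := by simp
          rw [hd, ih (rest.drop 2) (by simp at hl ⊢; omega) f (by simp at hf ⊢; omega) [] _]
          simp only [pvGsplit, if_pos hP, List.reverse_cons, List.reverse_nil,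
            List.nil_append, List.modifyHead_cons, List.append_nil]
          rw [pv_modifyHead_id]
          simp
        · have hgo : PySem.Chars.splitOn.go ['a', 'n', 'd'] (f + 1) (c :: rest) cur acc =
              PySem.Chars.splitOn.go ['a', 'n', 'd'] f rest (c :: cur) acc := by
            simp [PySem.Chars.splitOn.go, hP]
          rw [hgo, ih rest (by simp at hl; omega) f (by simp at hf; omega) (c :: cur) acc]
          simp only [pvGsplit, if_neg hP]
          congr 1
          cases hg : pvGsplit rest <;> simp

lemma pv_splitOn_eq_gsplit (l : List Char) :
    PySem.Chars.splitOn l ['a', 'n', 'd'] = pvGsplit l := by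
  unfold PySem.Chars.splitOn
  rw [pv_go_eq_gsplit l.length l (le_refl _) (l.length + 1) (by omega) [] []]
  simp [pv_modifyHead_id]

-- shift: occurrences in c :: rest at positions ≥ k+1 are the occurrences in rest at ≥ k, shifted
lemma pvOccs_cons_shift (c : Char) (rest : List Char) (k : Nat) :
    pvOccs (c :: rest) (k + 1) = (pvOccs rest k).map (· + 1) := by
  unfold pvOccs
  have h : (c :: rest).length + 1 - (k + 1) = rest.length + 1 - k := by simp
  rw [h, List.range'_succ_left, List.filter_map]
  rfl

-- on a match the next two positions cannot match ('and' does not overlap itself)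
lemma pvROccs_eq_pvOccs : ∀ n (l : List Char), l.length ≤ n → pvROccs l = pvOccs l 0 := by
  intro n
  induction n with
  | zero =>
    intro l hl
    have : l = [] := by cases l <;> simp_all
    subst this
    simp [pvROccs, pvOccs, List.range', PySem.Chars.startswith]
  | succ n ih =>
    intro l hl
    cases l with
    | nil => simp [pvROccs, pvOccs, List.range', PySem.Chars.startswith]
    | cons c rest =>
      rw [pvOccs_step (c :: rest) 0 (by simp)]
      by_cases hP : ['a', 'n', 'd'].isPrefixOf (c :: rest) = true
      · -- l = 'a' :: 'n' :: 'd' :: t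
        obtain ⟨t, ht⟩ : ∃ t, c :: rest = 'a' :: 'n' :: 'd' :: t := by
          obtain ⟨t, ht⟩ := List.isPrefixOf_iff_prefix.mp hP
          exact ⟨t, by simpa using ht.symm⟩
        injection ht with hc hrest
        subst hc; subst hrest
        have hsw : PySem.Chars.startswith (('a' :: 'n' :: 'd' :: t).drop 0) ['a', 'n', 'd'] = true := by
          simp [PySem.Chars.startswith, hP]
        rw [if_pos hsw]
        have h1 : pvOccs ('a' :: 'n' :: 'd' :: t) 1 = (pvOccs ('n' :: 'd' :: t) 0).map (· + 1) :=
          pvOccs_cons_shift _ _ 0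
        have h2 : pvOccs ('n' :: 'd' :: t) 0 =
            (if PySem.Chars.startswith (('n' :: 'd' :: t).drop 0) ['a', 'n', 'd'] then [0] else [])
              ++ pvOccs ('n' :: 'd' :: t) 1 := pvOccs_step _ 0 (by simp)
        have h3 : pvOccs ('n' :: 'd' :: t) 1 = (pvOccs ('d' :: t) 0).map (· + 1) :=
          pvOccs_cons_shift _ _ 0
        have h4 : pvOccs ('d' :: t) 0 =
            (if PySem.Chars.startswith (('d' :: t).drop 0) ['a', 'n', 'd'] then [0] else [])
              ++ pvOccs ('d' :: t) 1 := pvOccs_step _ 0 (by simp)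
        have h5 : pvOccs ('d' :: t) 1 = (pvOccs t 0).map (· + 1) := pvOccs_cons_shift _ _ 0
        have hswn : PySem.Chars.startswith (('n' :: 'd' :: t).drop 0) ['a', 'n', 'd'] = false := by
          simp [PySem.Chars.startswith, List.isPrefixOf]
        have hswd : PySem.Chars.startswith (('d' :: t).drop 0) ['a', 'n', 'd'] = false := by
          simp [PySem.Chars.startswith, List.isPrefixOf]
        rw [h1, h2, hswn, h3, h4, hswd, h5]
        simp only [Bool.false_eq_true, if_false, List.nil_append, List.map_map]
        have hocc : pvROccs ('a' :: 'n' :: 'd' :: t) = 0 :: (pvROccs t).map (· + 3) := by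
          rw [pvROccs, if_pos hP]
          rfl
        rw [hocc, ih t (by simp at hl; omega)]
        congr 1
      · have hsw : PySem.Chars.startswith ((c :: rest).drop 0) ['a', 'n', 'd'] = false := by
          simp only [List.drop_zero, PySem.Chars.startswith]
          exact Bool.eq_false_iff.mpr hP
        rw [hsw]
        simp only [Bool.false_eq_true, if_false, List.nil_append]
        rw [show (0 : Nat) + 1 = 0 + 1 by rfl, pvOccs_cons_shift c rest 0]
        rw [pvROccs, if_neg hP, ih rest (by simp at hl; omega)]

lemma pv_gsplit_ne_nil : ∀ n (l : List Char), l.length ≤ n → pvGsplit l ≠ [] := by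
  intro n
  induction n with
  | zero =>
    intro l hl
    have : l = [] := by cases l <;> simp_all
    subst this; simp [pvGsplit]
  | succ n ih =>
    intro l hl
    cases l with
    | nil => simp [pvGsplit]
    | cons c rest =>
      rw [pvGsplit]
      split
      · simp
      · have := ih rest (by simp at hl; omega)
        cases hg : pvGsplit rest
        · exact absurd hg this
        · simp

lemma pv_gsplit_len : ∀ n (l : List Char), l.length ≤ n →
    (pvGsplit l).length = (pvROccs l).length + 1 := by
  intro n
  induction n with
  | zero =>
    intro l hl
    have : l = [] := by cases l <;> simp_all
    subst this; simp [pvGsplit, pvROccs]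
  | succ n ih =>
    intro l hl
    cases l with
    | nil => simp [pvGsplit, pvROccs]
    | cons c rest =>
      rw [pvGsplit, pvROccs]
      split
      · simp [ih (rest.drop 2) (by simp at hl ⊢; omega)]
      · simp [ih rest (by simp at hl; omega)]

-- the k-th occurrence = total length of the first k pieces + 3 per separator between them
lemma pv_gsplit_sum : ∀ n (l : List Char), l.length ≤ n → ∀ k, 1 ≤ k → k ≤ (pvROccs l).length →
    (((pvGsplit l).take k).map List.length).sum + 3 * (k - 1) = (pvROccs l).getD (k - 1) 0 := by
  intro n
  induction n with
  | zero =>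
    intro l hl k h1 h2
    have : l = [] := by cases l <;> simp_all
    subst this; simp [pvROccs] at h2; omega
  | succ n ih =>
    intro l hl k h1 h2
    cases l with
    | nil => simp [pvROccs] at h2; omega
    | cons c rest =>
      by_cases hP : ['a', 'n', 'd'].isPrefixOf (c :: rest) = true
      · rw [pvGsplit, if_pos hP]
        rw [pvROccs, if_pos hP] at h2 ⊢
        rcases Nat.eq_or_lt_of_le h1 with hk1 | hk1
        · subst hk1
          simp
        · -- k ≥ 2
          have hk2 : 2 ≤ k := hk1
          have htk : (([] : List Char) :: pvGsplit (rest.drop 2)).take k =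
              [] :: (pvGsplit (rest.drop 2)).take (k - 1) := by
            conv_lhs => rw [show k = (k - 1) + 1 by omega]
            rw [List.take_succ_cons]
          rw [htk]
          have hlen2 : k - 1 ≤ (pvROccs (rest.drop 2)).length := by
            simp at h2; omega
          have := ih (rest.drop 2) (by simp at hl ⊢; omega) (k - 1) (by omega) hlen2
          simp only [List.map_cons, List.length_nil, List.sum_cons, Nat.zero_add]
          have hg : (0 :: (pvROccs (rest.drop 2)).map (· + 3)).getD (k - 1) 0 =
              ((pvROccs (rest.drop 2)).map (· + 3)).getD (k - 2) 0 := by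
            have hk : k - 1 = (k - 2) + 1 := by omega
            rw [hk, List.getD_cons_succ]
          rw [hg]
          have hmap : ((pvROccs (rest.drop 2)).map (· + 3)).getD (k - 2) 0 =
              (pvROccs (rest.drop 2)).getD (k - 2) 0 + 3 := by
            have hb : k - 2 < (pvROccs (rest.drop 2)).length := by omega
            rw [List.getD_eq_getElem _ _ (by simpa using hb), List.getD_eq_getElem _ _ hb]
            simp
          rw [hmap]
          rw [show k - 1 - 1 = k - 2 from by omega] at this
          omega
      · rw [pvGsplit, if_neg hP]
        rw [pvROccs, if_neg hP] at h2 ⊢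
        have hlen : k ≤ (pvROccs rest).length := by simpa using h2
        have hne := pv_gsplit_ne_nil rest.length rest (le_refl _)
        obtain ⟨a, t, hg⟩ : ∃ a t, pvGsplit rest = a :: t := by
          cases hgr : pvGsplit rest
          · exact absurd hgr hne
          · exact ⟨_, _, rfl⟩
        rw [hg]
        have htk : ((a :: t).modifyHead (c :: ·)).take k = (c :: a) :: t.take (k - 1) := by
          conv_lhs => rw [show k = (k - 1) + 1 by omega]
          rw [List.modifyHead_cons, List.take_succ_cons]
        rw [htk]
        have := ih rest (by simp at hl; omega) k h1 hlen
        rw [hg] at this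
        have htk2 : (a :: t).take k = a :: t.take (k - 1) := by
          conv_lhs => rw [show k = (k - 1) + 1 by omega]
          rw [List.take_succ_cons]
        rw [htk2] at this
        have hmap : ((pvROccs rest).map (· + 1)).getD (k - 1) 0 =
            (pvROccs rest).getD (k - 1) 0 + 1 := by
          have hb : k - 1 < (pvROccs rest).length := by omega
          rw [List.getD_eq_getElem _ _ (by simpa using hb), List.getD_eq_getElem _ _ hb]
          simp
        rw [hmap, ← this]
        simp only [List.map_cons, List.sum_cons, List.length_cons]
        omega

-- ===== VERDICT (by name: the statement is the Claim_ definition above) =====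
theorem get_and_index_spec : Claim_equal_get_and_index := by
  intro authors mc _
  unfold Spec_get_and_index get_and_index get_and_index_alt
  have hfind : PySem.Str.find authors "and" =
      PySem.Chars.findFrom authors.toList ['a', 'n', 'd'] ((0 : Nat) : Int) none := by
    rw [show (((0 : Nat) : Int)) = (0 : Int) by rfl, PySem.Chars.findFrom_zero]
    simp
  rw [hfind, pv_go_spec authors mc (authors.toList.length + 1) 0 0 (-1)
    (Nat.zero_le _) (by simpa using pv_occs_len authors.toList 0)]
  rw [pv_splitOn_eq_gsplit authors.toList]
  set l := authors.toList with hl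
  have hO : pvROccs l = pvOccs l 0 := pvROccs_eq_pvOccs l.length l (le_refl _)
  have hlen : (pvGsplit l).length = (pvROccs l).length + 1 :=
    pv_gsplit_len l.length l (le_refl _)
  simp only [← hO, sub_zero, zero_add]
  by_cases hg : 0 < mc ∧ mc ≤ ((pvROccs l).length : Int)
  · rw [if_pos hg, if_pos (by rw [hlen]; push_cast; omega)]
    have hk1 : 1 ≤ mc.toNat := by omega
    have hk2 : mc.toNat ≤ (pvROccs l).length := by omega
    have hs := pv_gsplit_sum l.length l (le_refl _) mc.toNat hk1 hk2
    have he1 : (mc - 1).toNat = mc.toNat - 1 := by omega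
    rw [he1]
    have he2 : (3 : Int) * (mc - 1) = ((3 * (mc.toNat - 1) : Nat) : Int) := by
      push_cast; omega
    rw [he2]
    push_cast [← hs]
    ring
  · rw [if_neg hg, if_neg (by rw [hlen]; push_cast; omega)]
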